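-- pv_equiv track=rewrite | github.com/achiyane/ParserADSSDTO | Parser.py | changedDTO5
-- ===== SOURCE A (Python) =====
-- pathToDal = "1"
--
-- def getPathFromSrc():
--     if "src" in pathToDal:
--         return pathToDal.split("src\\")[1].replace("\\", ".")
--     else:
--         return "DataAccess"
--
-- def changedDTO5(ts):
--     d = getPathFromSrc()
--     dto = ["package DataAccess.DTOs;", "import DataAccess.PrimaryKeys.PK;", "import java.lang.reflect.Field;"]
--     skip = False
--     lst = ts.split("\n")
--     fin = ""
--     for i in range(len(lst)):
--         a = lst[i]
--         if "import" in a and not skip: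
--             skip = True
--             for j in dto:
--                 fin += j.replace("DataAccess", d) + "\n"
--         elif "import" not in a:
--             fin += a + "\n"
--     return fin
-- ===== SOURCE B (Python) =====
-- pathToDal = "1"
--
-- def getPathFromSrc():
--     if "src" in pathToDal:
--         return pathToDal.split("src\\")[1].replace("\\", ".")
--     else:
--         return "DataAccess"
--
-- def changedDTO5(ts):
--     d = getPathFromSrc()
--     dto = ["package DataAccess.DTOs;", "import DataAccess.PrimaryKeys.PK;", "import java.lang.reflect.Field;"]
--     lines = ts.split("\n")
--     idx = next((i for i, a in enumerate(lines) if "import" in a), None)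
--     if idx is None:
--         parts = lines
--     else:
--         parts = (lines[:idx]
--                  + [j.replace("DataAccess", d) for j in dto]
--                  + [a for a in lines[idx + 1:] if "import" not in a])
--     return "".join(p + "\n" for p in parts)
-- ===== Notes on version B (the rewrite author's own statement) =====
-- stated objective: alternative
-- what changed: Replaces A's stateful skip-flag scan that appends to a growing string with a two-phase splice: first find the index of the first import line, then concatenate the prefix slice, the substituted dto block and the import-filtered suffix, joined once.
import Mathlib
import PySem

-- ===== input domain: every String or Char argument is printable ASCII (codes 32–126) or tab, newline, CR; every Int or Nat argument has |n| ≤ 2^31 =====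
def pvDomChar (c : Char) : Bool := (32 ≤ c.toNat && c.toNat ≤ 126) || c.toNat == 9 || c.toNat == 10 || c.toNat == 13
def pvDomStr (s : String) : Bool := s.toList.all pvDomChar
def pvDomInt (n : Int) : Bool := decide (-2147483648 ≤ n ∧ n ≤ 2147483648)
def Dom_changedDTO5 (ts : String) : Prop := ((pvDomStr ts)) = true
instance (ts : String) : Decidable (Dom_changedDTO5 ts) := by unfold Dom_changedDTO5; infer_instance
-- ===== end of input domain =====

-- B replaces A's stateful skip-flag scan (string concatenation in a loop) by an
-- index-then-splice construction: find the first 'import' line, then concatenate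
-- prefix + substituted dto block + import-filtered suffix and join once (objective: alternative).

-- ===== PORT A =====
-- module constant
def pathToDal : String := "1"

-- transliteration of getPathFromSrc (the then-branch is Python's
-- pathToDal.split("src\\")[1].replace("\\", "."); the [1] default "" stands in for
-- the IndexError path, which is unreachable for the module constant pathToDal = "1")
def getPathFromSrc : String :=
  if PySem.Str.isIn "src" pathToDal then
    PySem.Str.replace
      (PySem.List.pyGetD ((PySem.Str.split? pathToDal "src\\").getD []) 1 "") "\\" "."
  else
    "DataAccess"

def dtoList : List String :=
  ["package DataAccess.DTOs;", "import DataAccess.PrimaryKeys.PK;", "import java.lang.reflect.Field;"]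

-- the body of A's for-loop, on state (skip, fin); fin is kept as List Char
-- (Lean's own String.append is kernel-opaque), converted back at the end
def stepA (d : String) (st : Bool × List Char) (a : String) : Bool × List Char :=
  let (skip, fin) := st
  if PySem.Str.isIn "import" a && !skip then
    (true, dtoList.foldl (fun f j => f ++ (PySem.Str.replace j "DataAccess" d).toList ++ ['\n']) fin)
  else if !(PySem.Str.isIn "import" a) then
    (skip, fin ++ a.toList ++ ['\n'])
  else
    (skip, fin)

def changedDTO5 (ts : String) : String :=
  let d := getPathFromSrc
  let lst := (PySem.Str.split? ts "\n").getD []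
  String.ofList (lst.foldl (stepA d) (false, [])).2

-- ===== PORT B =====
def changedDTO5_alt (ts : String) : String :=
  let d := getPathFromSrc
  let lines := (PySem.Str.split? ts "\n").getD []
  let block := dtoList.map (fun j => PySem.Str.replace j "DataAccess" d)
  let parts :=
    match lines.findIdx? (fun a => PySem.Str.isIn "import" a) with
    | none => lines
    | some i =>
        lines.take i ++ block
          ++ (lines.drop (i + 1)).filter (fun a => !(PySem.Str.isIn "import" a))
  String.ofList (parts.flatMap (fun p => p.toList ++ ['\n']))

-- ===== PRECONDITION & SPEC =====
def Spec_changedDTO5 (ts : String) (out : String) : Prop := out = changedDTO5_alt ts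
instance (ts : String) (out : String) : Decidable (Spec_changedDTO5 ts out) := by unfold Spec_changedDTO5; infer_instance

-- ===== CLAIM (what is proved, stated in full; the proofs are below) =====
def Claim_equal_changedDTO5 : Prop := ∀ (ts : String), Dom_changedDTO5 ts → Spec_changedDTO5 ts (changedDTO5 ts)

-- ===== LEMMAS AND PROOFS =====

-- one output line, as characters
def pvLine (a : String) : List Char := a.toList ++ ['\n']

-- the dto block A emits, as characters
def pvBlock (d : String) : List Char :=
  (dtoList.map (fun j => PySem.Str.replace j "DataAccess" d)).flatMap pvLine

-- once skip is true, the loop keeps exactly the non-import lines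
lemma loopA_true (d : String) :
    ∀ (l : List String) (fin : List Char),
      l.foldl (stepA d) (true, fin)
        = (true, fin ++ (l.filter (fun a => !(PySem.Str.isIn "import" a))).flatMap pvLine) := by
  intro l
  induction l with
  | nil => intro fin; simp
  | cons a rest ih =>
    intro fin
    by_cases h : PySem.Chars.isIn ['i','m','p','o','r','t'] a.toList = true <;>
      simp [stepA, h, ih, pvLine]

-- from skip = false, the loop result is prefix + block + filtered suffix
lemma loopA_false (d : String) :
    ∀ (l : List String) (fin : List Char),
      l.foldl (stepA d) (false, fin)
        = match l.findIdx? (fun a => PySem.Str.isIn "import" a) with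
          | none => (false, fin ++ l.flatMap pvLine)
          | some i =>
              (true, fin ++ (l.take i).flatMap pvLine ++ pvBlock d
                ++ ((l.drop (i + 1)).filter (fun a => !(PySem.Str.isIn "import" a))).flatMap pvLine) := by
  intro l
  induction l with
  | nil => intro fin; simp
  | cons a rest ih =>
    intro fin
    by_cases h : PySem.Chars.isIn ['i','m','p','o','r','t'] a.toList = true
    · have hstep : stepA d (false, fin) a = (true, fin ++ pvBlock d) := by
        simp [stepA, h, pvBlock, pvLine, dtoList]
      simp [List.foldl_cons, hstep, loopA_true, List.findIdx?_cons, h]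
    · have hstep : stepA d (false, fin) a = (false, fin ++ a.toList ++ ['\n']) := by
        simp [stepA, h]
      rw [List.foldl_cons, hstep, ih]
      cases hfi : rest.findIdx? (fun a => PySem.Chars.isIn ['i','m','p','o','r','t'] a.toList) with
      | none => simp [List.findIdx?_cons, h, hfi, pvLine]
      | some i => simp [List.findIdx?_cons, h, hfi, pvLine, List.take_succ_cons, List.drop_succ_cons]

-- the core equality, over the already-split list of lines
lemma core_eq (d : String) (lines : List String) :
    (lines.foldl (stepA d) (false, [])).2
      =
      (match lines.findIdx? (fun a => PySem.Str.isIn "import" a) with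
        | none => lines
        | some i =>
            lines.take i ++ dtoList.map (fun j => PySem.Str.replace j "DataAccess" d)
              ++ (lines.drop (i + 1)).filter (fun a => !(PySem.Str.isIn "import" a))).flatMap
        pvLine := by
  rw [loopA_false]
  cases hfi : lines.findIdx? (fun a => PySem.Str.isIn "import" a) with
  | none => rfl
  | some i => simp [pvBlock, List.flatMap_append]

-- ===== VERDICT (by name: the statement is the Claim_ definition above) =====
theorem changedDTO5_spec : Claim_equal_changedDTO5 := by
  intro ts _
  exact congrArg String.ofList
    (core_eq getPathFromSrc ((PySem.Str.split? ts "\n").getD []))
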